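-- pv_equiv track=rewrite | github.com/muzaffar401/product_description_generator | main1.py | _categories_match
-- ===== SOURCE A (Python) =====
-- def _categories_match(category1, category2):
--     """
--     Check if two categories match, allowing for variations in naming.
--     """
--     # Normalize categories
--     cat1 = category1.lower().strip()
--     cat2 = category2.lower().strip()
--
--     # Direct match
--     if cat1 == cat2:
--         return True
--
--     # Shoe variations
--     shoe_keywords = ['shoe', 'sneaker', 'footwear', 'athletic', 'running', 'dress']
--     if any(keyword in cat1 for keyword in shoe_keywords) and any(keyword in cat2 for keyword in shoe_keywords):
--         return True
--
--     # Spice variations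
--     spice_keywords = ['spice', 'seasoning', 'masala', 'condiment']
--     if any(keyword in cat1 for keyword in spice_keywords) and any(keyword in cat2 for keyword in spice_keywords):
--         return True
--
--     # Electronics variations
--     electronic_keywords = ['electronic', 'gadget', 'device', 'phone', 'laptop']
--     if any(keyword in cat1 for keyword in electronic_keywords) and any(keyword in cat2 for keyword in electronic_keywords):
--         return True
--
--     # Clothing variations
--     clothing_keywords = ['clothing', 'apparel', 'garment', 'shirt', 'pants']
--     if any(keyword in cat1 for keyword in clothing_keywords) and any(keyword in cat2 for keyword in clothing_keywords):
--         return True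
--
--     return False
-- ===== SOURCE B (Python) =====
-- # B: one flat keyword->bitmask table and a single accumulating pass per category;
-- # categories match iff equal after normalization or their group bitmasks intersect
-- # (integer AND), replacing A's four paired any/any branches (objective: alternative).
--
-- _KEYWORD_BITS = [
--     ('shoe', 1), ('sneaker', 1), ('footwear', 1), ('athletic', 1), ('running', 1), ('dress', 1),
--     ('spice', 2), ('seasoning', 2), ('masala', 2), ('condiment', 2),
--     ('electronic', 4), ('gadget', 4), ('device', 4), ('phone', 4), ('laptop', 4),
--     ('clothing', 8), ('apparel', 8), ('garment', 8), ('shirt', 8), ('pants', 8),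
-- ]
--
--
-- def _group_mask(cat):
--     mask = 0
--     for keyword, bit in _KEYWORD_BITS:
--         if keyword in cat:
--             mask |= bit
--     return mask
--
--
-- def _categories_match(category1, category2):
--     cat1 = category1.lower().strip()
--     cat2 = category2.lower().strip()
--     return cat1 == cat2 or (_group_mask(cat1) & _group_mask(cat2)) != 0
-- ===== Notes on version B (the rewrite author's own statement) =====
-- stated objective: alternative
-- what changed: Replaces A's four hard-coded paired any/any branches and early returns with one flat keyword-to-bit table, a single accumulating pass computing an integer group bitmask per category, and a bitwise AND test for a shared group.
import Mathlib
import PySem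

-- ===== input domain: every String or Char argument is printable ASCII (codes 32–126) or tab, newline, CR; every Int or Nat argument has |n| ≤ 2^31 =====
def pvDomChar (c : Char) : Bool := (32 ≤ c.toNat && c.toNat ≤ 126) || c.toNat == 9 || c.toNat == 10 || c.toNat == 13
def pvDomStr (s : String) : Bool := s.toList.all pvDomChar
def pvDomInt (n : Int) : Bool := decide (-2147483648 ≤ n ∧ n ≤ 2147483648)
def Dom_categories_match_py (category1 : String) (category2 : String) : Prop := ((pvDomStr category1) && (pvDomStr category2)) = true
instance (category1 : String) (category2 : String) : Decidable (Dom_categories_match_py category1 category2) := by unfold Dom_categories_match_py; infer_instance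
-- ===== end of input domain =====

-- B replaces A's four paired any/any branches by one flat keyword->bit table, a single
-- accumulating bitmask pass per category, and a bitwise AND test (objective: alternative).

-- ===== PORT A =====
-- literal transliteration of A: normalize, direct match, then four paired any/any branches
def categories_match_py (category1 : String) (category2 : String) : Bool :=
  let cat1 := PySem.Str.strip (PySem.Str.lower category1)
  let cat2 := PySem.Str.strip (PySem.Str.lower category2)
  if cat1 == cat2 then true
  else
    let shoe_keywords := ["shoe", "sneaker", "footwear", "athletic", "running", "dress"]
    if (shoe_keywords.any fun k => PySem.Str.isIn k cat1) &&
       (shoe_keywords.any fun k => PySem.Str.isIn k cat2) then true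
    else
      let spice_keywords := ["spice", "seasoning", "masala", "condiment"]
      if (spice_keywords.any fun k => PySem.Str.isIn k cat1) &&
         (spice_keywords.any fun k => PySem.Str.isIn k cat2) then true
      else
        let electronic_keywords := ["electronic", "gadget", "device", "phone", "laptop"]
        if (electronic_keywords.any fun k => PySem.Str.isIn k cat1) &&
           (electronic_keywords.any fun k => PySem.Str.isIn k cat2) then true
        else
          let clothing_keywords := ["clothing", "apparel", "garment", "shirt", "pants"]
          if (clothing_keywords.any fun k => PySem.Str.isIn k cat1) &&
             (clothing_keywords.any fun k => PySem.Str.isIn k cat2) then true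
          else false

-- ===== PORT B =====
-- _KEYWORD_BITS: flat literal keyword -> group-bit table
def pvKeywordBits : List (String × Nat) :=
  [("shoe", 1), ("sneaker", 1), ("footwear", 1), ("athletic", 1), ("running", 1), ("dress", 1),
   ("spice", 2), ("seasoning", 2), ("masala", 2), ("condiment", 2),
   ("electronic", 4), ("gadget", 4), ("device", 4), ("phone", 4), ("laptop", 4),
   ("clothing", 8), ("apparel", 8), ("garment", 8), ("shirt", 8), ("pants", 8)]

-- _group_mask: one accumulating pass OR-ing the bit of every keyword occurring in cat
def pvGroupMask (cat : String) : Nat :=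
  pvKeywordBits.foldl
    (fun mask p => if PySem.Str.isIn p.1 cat then mask ||| p.2 else mask) 0

-- _categories_match of Source B: normalize, equality or nonzero AND of the two masks
def categories_match_py_alt (category1 : String) (category2 : String) : Bool :=
  let cat1 := PySem.Str.strip (PySem.Str.lower category1)
  let cat2 := PySem.Str.strip (PySem.Str.lower category2)
  (cat1 == cat2) || decide ((pvGroupMask cat1 &&& pvGroupMask cat2) ≠ 0)

-- ===== PRECONDITION & SPEC =====
def Spec_categories_match_py (category1 : String) (category2 : String) (out : Bool) : Prop := out = categories_match_py_alt category1 category2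
instance (category1 : String) (category2 : String) (out : Bool) : Decidable (Spec_categories_match_py category1 category2 out) := by unfold Spec_categories_match_py; infer_instance

-- ===== CLAIM =====
def Claim_equal_categories_match_py : Prop := ∀ (category1 : String) (category2 : String), Dom_categories_match_py category1 category2 → Spec_categories_match_py category1 category2 (categories_match_py category1 category2)

-- ===== LEMMAS AND PROOFS =====
-- folding one group's segment of the table ORs in its bit iff some keyword hits
theorem pv_fold_seg (cat : String) (b : Nat) (ks : List String) (m0 : Nat) :
    (ks.map (fun k => (k, b))).foldl
      (fun mask p => if PySem.Str.isIn p.1 cat then mask ||| p.2 else mask) m0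
    = m0 ||| (if ks.any (fun k => PySem.Str.isIn k cat) then b else 0) := by
  induction ks generalizing m0 with
  | nil => simp
  | cons k ks ih =>
    cases hk : PySem.Str.isIn k cat <;>
    cases ha : (ks.any fun k => PySem.Str.isIn k cat) <;>
      simp only [List.map_cons, List.foldl_cons, List.any_cons, hk, ha, ih] <;>
      simp

-- the mask decomposes into the four per-group any-tests
theorem pv_mask_eq (cat : String) : pvGroupMask cat =
    ((((if ["shoe", "sneaker", "footwear", "athletic", "running", "dress"].any
            (fun k => PySem.Str.isIn k cat) then 1 else 0) |||
       (if ["spice", "seasoning", "masala", "condiment"].any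
            (fun k => PySem.Str.isIn k cat) then 2 else 0)) |||
       (if ["electronic", "gadget", "device", "phone", "laptop"].any
            (fun k => PySem.Str.isIn k cat) then 4 else 0)) |||
       (if ["clothing", "apparel", "garment", "shirt", "pants"].any
            (fun k => PySem.Str.isIn k cat) then 8 else 0)) := by
  have hsplit : pvKeywordBits =
      (["shoe", "sneaker", "footwear", "athletic", "running", "dress"].map (fun k => (k, (1:Nat)))) ++
      (["spice", "seasoning", "masala", "condiment"].map (fun k => (k, (2:Nat)))) ++
      (["electronic", "gadget", "device", "phone", "laptop"].map (fun k => (k, (4:Nat)))) ++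
      (["clothing", "apparel", "garment", "shirt", "pants"].map (fun k => (k, (8:Nat)))) := by rfl
  unfold pvGroupMask
  rw [hsplit, List.foldl_append, List.foldl_append, List.foldl_append,
      pv_fold_seg, pv_fold_seg, pv_fold_seg, pv_fold_seg, Nat.zero_or]

set_option maxHeartbeats 1600000 in
theorem pv_main (c1 c2 : String) :
    categories_match_py c1 c2 = categories_match_py_alt c1 c2 := by
  unfold categories_match_py categories_match_py_alt
  set n1 := PySem.Str.strip (PySem.Str.lower c1) with hn1
  set n2 := PySem.Str.strip (PySem.Str.lower c2) with hn2
  by_cases he : n1 == n2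
  · simp [he]
  · have he' : (n1 == n2) = false := by simpa using he
    rw [if_neg he]
    simp only [pv_mask_eq]
    cases h1 : (["shoe", "sneaker", "footwear", "athletic", "running", "dress"].any fun k => PySem.Str.isIn k n1) <;>
    cases h2 : (["shoe", "sneaker", "footwear", "athletic", "running", "dress"].any fun k => PySem.Str.isIn k n2) <;>
    cases h3 : (["spice", "seasoning", "masala", "condiment"].any fun k => PySem.Str.isIn k n1) <;>
    cases h4 : (["spice", "seasoning", "masala", "condiment"].any fun k => PySem.Str.isIn k n2) <;>
    cases h5 : (["electronic", "gadget", "device", "phone", "laptop"].any fun k => PySem.Str.isIn k n1) <;>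
    cases h6 : (["electronic", "gadget", "device", "phone", "laptop"].any fun k => PySem.Str.isIn k n2) <;>
    cases h7 : (["clothing", "apparel", "garment", "shirt", "pants"].any fun k => PySem.Str.isIn k n1) <;>
    cases h8 : (["clothing", "apparel", "garment", "shirt", "pants"].any fun k => PySem.Str.isIn k n2) <;>
      (simp only [he']; decide)

-- ===== VERDICT =====
theorem categories_match_py_spec : Claim_equal_categories_match_py :=
  fun c1 c2 _ => pv_main c1 c2
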